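-- pv_equiv track=rewrite | github.com/armbian/armbian.github.io | scripts/generate-base-files-info-json.py | parse_packages_for_package
-- ===== SOURCE A (Python) =====
-- def parse_packages_for_package(packages_content, package_name):
--     """
--     Parse Packages.gz content to find package information
--     """
--     # Split into individual package entries
--     packages = packages_content.split('\n\n')
--
--     for package_entry in packages:
--         if not package_entry.strip():
--             continue
--
--         package_info = {}
--         for line in package_entry.split('\n'):
--             if ':' in line:
--                 key, value = line.split(':', 1)
--                 package_info[key.strip().lower()] = value.strip()
--
--         # Check if this is our package
--         if package_info.get('package', '').lower() == package_name.lower():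
--             return package_info
--
--     return None
-- ===== SOURCE B (Python) =====
-- def _parse_entry(package_entry):
--     package_info = {}
--     for line in package_entry.split('\n'):
--         if ':' in line:
--             key, value = line.split(':', 1)
--             package_info[key.strip().lower()] = value.strip()
--     return package_info
--
--
-- def parse_packages_for_package(packages_content, package_name):
--     # Build an index of all entries keyed by lowercased package name
--     # (first occurrence wins), then answer with one lookup.
--     index = {}
--     for package_entry in packages_content.split('\n\n'):
--         if not package_entry.strip():
--             continue
--         info = _parse_entry(package_entry)
--         key = info.get('package', '').lower()
--         if key not in index:
--             index[key] = info
--     return index.get(package_name.lower())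
-- ===== Notes on version B (the rewrite author's own statement) =====
-- stated objective: alternative
-- what changed: Replaces A's scan-until-match loop with an early return by a single full pass that builds a first-occurrence index dict keyed by lowercased package name (entries without a package field indexed under ''), answered by one dict lookup at the end.
import Mathlib
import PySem

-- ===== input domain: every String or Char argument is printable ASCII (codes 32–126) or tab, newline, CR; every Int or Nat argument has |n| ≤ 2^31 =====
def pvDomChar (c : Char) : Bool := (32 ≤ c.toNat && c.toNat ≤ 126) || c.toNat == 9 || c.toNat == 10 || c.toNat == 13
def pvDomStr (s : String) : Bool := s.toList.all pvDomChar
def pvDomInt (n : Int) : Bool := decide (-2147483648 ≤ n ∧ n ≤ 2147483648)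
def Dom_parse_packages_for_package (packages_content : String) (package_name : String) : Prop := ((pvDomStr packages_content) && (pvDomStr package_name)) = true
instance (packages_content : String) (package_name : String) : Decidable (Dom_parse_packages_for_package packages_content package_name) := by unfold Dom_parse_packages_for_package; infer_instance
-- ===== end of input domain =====

-- B builds a first-occurrence index dict keyed by lowercased package name and answers with one lookup,
-- instead of A's scan-until-match loop with an early return (objective: alternative).


-- ===== PORT A =====
-- shared entry parser: the inner 'for line in package_entry.split('\n')' loop, identical in A and B
def pvParseEntry (package_entry : String) : PySem.Dict String String :=
  (package_entry.toList.splitOn '\n').foldl (fun package_info lineCs =>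
    let line : String := String.ofList lineCs
    if PySem.Str.isIn ":" line then
      match PySem.Str.splitMax? line ":" 1 with
      | some (key :: value :: []) =>
          package_info.insert (PySem.Str.lower (PySem.Str.strip key)) (PySem.Str.strip value)
      | _ => package_info   -- unreachable: ':' in line gives exactly two parts
    else package_info) PySem.Dict.empty

-- A's loop: scan entries, return the first whose package field matches
def pvFindA (packages : List String) (target : String) : Option (List (String × String)) :=
  match packages with
  | [] => none
  | package_entry :: rest =>
    if PySem.Str.strip package_entry = "" then pvFindA rest target
    else
      let package_info := pvParseEntry package_entry
      if PySem.Str.lower (package_info.getD "package" "") = target then some package_info.items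
      else pvFindA rest target

def parse_packages_for_package (packages_content : String) (package_name : String) : Option (List (String × String)) :=
  let packages := (PySem.Str.split? packages_content "\n\n").getD []   -- sep ≠ "", so split? is some
  pvFindA packages (PySem.Str.lower package_name)

-- ===== PORT B =====
-- B's pass: fold all entries into an index dict, first occurrence wins
def pvKeyB (package_entry : String) : String :=
  PySem.Str.lower ((pvParseEntry package_entry).getD "package" "")

def pvStepB (index : PySem.Dict String (List (String × String))) (package_entry : String) :
    PySem.Dict String (List (String × String)) :=
  if PySem.Str.strip package_entry = "" then index
  else if index.contains (pvKeyB package_entry) then index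
  else index.insert (pvKeyB package_entry) (pvParseEntry package_entry).items

def parse_packages_for_package_alt (packages_content : String) (package_name : String) : Option (List (String × String)) :=
  let packages := (PySem.Str.split? packages_content "\n\n").getD []   -- sep ≠ "", so split? is some
  let index := packages.foldl pvStepB PySem.Dict.empty
  index.get? (PySem.Str.lower package_name)

-- ===== PRECONDITION & SPEC =====
def Spec_parse_packages_for_package (packages_content : String) (package_name : String) (out : Option (List (String × String))) : Prop := out = parse_packages_for_package_alt packages_content package_name
instance (packages_content : String) (package_name : String) (out : Option (List (String × String))) : Decidable (Spec_parse_packages_for_package packages_content package_name out) := by unfold Spec_parse_packages_for_package; infer_instance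

-- ===== CLAIM (what is proved, stated in full; the proofs are below) =====
def Claim_equal_parse_packages_for_package : Prop := ∀ (packages_content : String) (package_name : String), Dom_parse_packages_for_package packages_content package_name → Spec_parse_packages_for_package packages_content package_name (parse_packages_for_package packages_content package_name)

-- ===== LEMMAS AND PROOFS =====

-- once the target key is present, B's step leaves its binding (and its presence) unchanged
theorem pvStepB_preserves (d : PySem.Dict String (List (String × String))) (e t : String)
    (h : d.contains t = true) :
    (pvStepB d e).get? t = d.get? t ∧ (pvStepB d e).contains t = true := by
  unfold pvStepB pvKeyB
  split_ifs with h1 h2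
  · exact ⟨rfl, h⟩
  · exact ⟨rfl, h⟩
  · refine ⟨PySem.Dict.get?_insert_of_ne _ _ ?hne, ?_⟩
    case hne =>
      intro hEq
      subst hEq
      simp [h] at h2
    · rw [PySem.Dict.contains_insert]
      simp [h]

theorem pvFoldB_preserves (l : List String) (d : PySem.Dict String (List (String × String))) (t : String)
    (h : d.contains t = true) :
    (l.foldl pvStepB d).get? t = d.get? t := by
  induction l generalizing d with
  | nil => rfl
  | cons e rest ih =>
    have := pvStepB_preserves d e t h
    simp only [List.foldl_cons]
    rw [ih _ this.2, this.1]

-- main invariant: while the target key is absent from the accumulator, B's fold finds exactly what A's scan finds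
theorem pvFoldB_eq_findA (l : List String) (d : PySem.Dict String (List (String × String))) (t : String)
    (h : d.contains t = false) :
    (l.foldl pvStepB d).get? t = pvFindA l t := by
  induction l generalizing d with
  | nil =>
    simpa [pvFindA, PySem.Dict.get?_eq_none_iff_contains] using h
  | cons e rest ih =>
    simp only [List.foldl_cons, pvFindA]
    by_cases h1 : PySem.Str.strip e = ""
    · rw [if_pos h1]
      show (rest.foldl pvStepB (pvStepB d e)).get? t = pvFindA rest t
      unfold pvStepB
      rw [if_pos h1]
      exact ih d h
    · rw [if_neg h1]
      by_cases h2 : PySem.Str.lower ((pvParseEntry e).getD "package" "") = t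
      · rw [if_pos h2]
        have hstep : pvStepB d e = d.insert t (pvParseEntry e).items := by
          unfold pvStepB pvKeyB
          rw [if_neg h1, h2, if_neg (by simp [h])]
        rw [hstep]
        rw [pvFoldB_preserves rest _ t (by rw [PySem.Dict.contains_insert]; simp)]
        exact PySem.Dict.get?_insert_self _ _ _
      · rw [if_neg h2]
        have hstep : (pvStepB d e).contains t = false := by
          unfold pvStepB pvKeyB
          rw [if_neg h1]
          split_ifs
          · exact h
          · rw [PySem.Dict.contains_insert]
            simp [h]
            intro hEq; exact h2 hEq.symm
        exact ih _ hstep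

-- ===== VERDICT (by name: the statement is the Claim_ definition above) =====
theorem parse_packages_for_package_spec : Claim_equal_parse_packages_for_package := by
  intro pc pn _
  unfold Spec_parse_packages_for_package parse_packages_for_package parse_packages_for_package_alt
  exact (pvFoldB_eq_findA _ PySem.Dict.empty _ rfl).symm
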